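-- pv_equiv track=rewrite | github.com/pypi-data/pypi-mirror-258 | packages/catbook/catbook-0.1.1.2.tar.gz/catbook-0.1.1.2/catbook/regular_section.py | _last_line
-- ===== SOURCE A (Python) =====
-- from typing import List, Optional, cast
--
-- def _last_line(lines: List[str], line_number: int) -> bool:
--     """returns True if line_number indicates the last non-blank line"""
--     n = len(lines)
--     if line_number == n:
--         return True
--     for r in range(line_number + 1, n):
--         if lines[r].strip() != "":
--             return False
--     return True
-- ===== SOURCE B (Python) =====
-- def _non_blank_indices(lines):
--     return [i for i, s in enumerate(lines) if s.strip() != ""]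
--
-- def _last_line(lines, line_number):
--     """returns True if line_number indicates the last non-blank line"""
--     non_blank = _non_blank_indices(lines)
--     last = non_blank[-1] if non_blank else -1
--     return last <= line_number
-- ===== Notes on version B (the rewrite author's own statement) =====
-- stated objective: alternative
-- what changed: B builds the forward list of non-blank line indices with enumerate+filter, takes its last element (or -1), and returns one comparison last <= line_number, instead of A's special n-case plus a forward all-blank scan of the tail with early return.
-- intended difference: For line_number <= -2 (within bounds) with every line blank, A returns True because its range indices wrap around via Python negative indexing; B returns False, the intended value since a negative line number can never denote the last non-blank line. — e.g. on _last_line([""], -2): A returns true, B returns false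
import Mathlib
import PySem

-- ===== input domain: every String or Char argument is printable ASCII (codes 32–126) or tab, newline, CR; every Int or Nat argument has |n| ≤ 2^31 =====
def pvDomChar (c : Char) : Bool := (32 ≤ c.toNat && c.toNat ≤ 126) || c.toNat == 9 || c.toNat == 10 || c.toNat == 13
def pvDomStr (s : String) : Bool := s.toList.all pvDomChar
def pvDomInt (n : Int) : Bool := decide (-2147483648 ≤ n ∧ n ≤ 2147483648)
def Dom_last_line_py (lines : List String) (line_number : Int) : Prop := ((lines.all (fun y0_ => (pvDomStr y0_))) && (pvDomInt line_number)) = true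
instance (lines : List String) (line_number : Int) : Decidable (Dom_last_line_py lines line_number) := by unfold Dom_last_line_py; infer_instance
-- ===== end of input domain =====

-- B replaces A's n special case plus forward all-blank tail scan by: collect the non-blank line
-- indices with enumerate+filter, take the last one (or -1), compare once; same cost, different structure.

-- ===== PORT A =====
-- the 'for r in range(line_number+1, n)' loop with its early 'return False'
def lastLineLoopA (lines : List String) : List Int → Bool
  | [] => true
  | r :: rs =>
    match PySem.List.pyGet? lines r with
    | none => false   -- Python raises IndexError here; Pre_last_line_py excludes these inputs
    | some s => if PySem.Str.strip s ≠ "" then false else lastLineLoopA lines rs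

def last_line_py (lines : List String) (line_number : Int) : Bool :=
  let n : Int := lines.length
  if line_number = n then true
  else lastLineLoopA lines (PySem.List.pyRange (line_number + 1) n 1)

-- ===== PORT B =====
-- '[i for i, s in enumerate(lines) if s.strip() != ""]'
def nonBlankIndices (lines : List String) : List Int :=
  (PySem.List.enumerate lines).filterMap
    (fun p => if PySem.Str.strip p.2 ≠ "" then some p.1 else none)

def last_line_py_alt (lines : List String) (line_number : Int) : Bool :=
  let nonBlank := nonBlankIndices lines
  -- 'non_blank[-1] if non_blank else -1': getLast?.getD -1 is exact for this expression
  let last : Int := nonBlank.getLast?.getD (-1)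
  decide (last ≤ line_number)

-- ===== PRECONDITION & SPEC =====
-- Pre_ excludes exactly the inputs where A raises IndexError: line_number+1 below -len(lines) with a non-empty range.
def Pre_last_line_py (lines : List String) (line_number : Int) : Prop :=
  (lines.length : Int) ≤ line_number + 1 ∨ -(lines.length : Int) ≤ line_number + 1
instance (lines : List String) (line_number : Int) : Decidable (Pre_last_line_py lines line_number) := by unfold Pre_last_line_py; infer_instance
def pvWitness_last_line_py : List String × Int := (["a"], 0)

-- For line_number ≤ -2 (within bounds) with every line blank, A returns True because its range indices
-- wrap around via Python negative indexing; B returns False, the intended value since a negative line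
-- number can never denote the last non-blank line.
def D_last_line_py (lines : List String) (line_number : Int) : Prop :=
  line_number ≤ -2 ∧ -(lines.length : Int) - 1 ≤ line_number ∧ ∀ s ∈ lines, PySem.Str.strip s = ""
instance (lines : List String) (line_number : Int) : Decidable (D_last_line_py lines line_number) := by unfold D_last_line_py; infer_instance

def Spec_last_line_py (lines : List String) (line_number : Int) (out : Bool) : Prop :=
  ¬ D_last_line_py lines line_number → out = last_line_py_alt lines line_number
instance (lines : List String) (line_number : Int) (out : Bool) : Decidable (Spec_last_line_py lines line_number out) := by unfold Spec_last_line_py; infer_instance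

def pvDiffWitness_last_line_py : List String × Int := ([""], -2)
def pvDiffWitnessOut_last_line_py : Bool × Bool := (true, false)

-- ===== CLAIM (what is proved, stated in full; the proofs are below) =====
def Claim_unchanged_last_line_py : Prop := ∀ (lines : List String) (line_number : Int), Dom_last_line_py lines line_number → Pre_last_line_py lines line_number → Spec_last_line_py lines line_number (last_line_py lines line_number)
def Claim_changed_last_line_py : Prop := Dom_last_line_py (pvDiffWitness_last_line_py.1) (pvDiffWitness_last_line_py.2) ∧ Pre_last_line_py (pvDiffWitness_last_line_py.1) (pvDiffWitness_last_line_py.2) ∧ D_last_line_py (pvDiffWitness_last_line_py.1) (pvDiffWitness_last_line_py.2) ∧ last_line_py (pvDiffWitness_last_line_py.1) (pvDiffWitness_last_line_py.2) = pvDiffWitnessOut_last_line_py.1 ∧ last_line_py_alt (pvDiffWitness_last_line_py.1) (pvDiffWitness_last_line_py.2) = pvDiffWitnessOut_last_line_py.2 ∧ pvDiffWitnessOut_last_line_py.1 ≠ pvDiffWitnessOut_last_line_py.2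
def Claim_exact_last_line_py : Prop := ∀ (lines : List String) (line_number : Int), Dom_last_line_py lines line_number → Pre_last_line_py lines line_number → D_last_line_py lines line_number → last_line_py lines line_number ≠ last_line_py_alt lines line_number

-- ===== LEMMAS AND PROOFS =====

-- blankness of the line at (in-range) index i
def blankAt (lines : List String) (i : Int) : Bool :=
  match PySem.List.pyGet? lines i with
  | none => true
  | some s => PySem.Str.strip s == ""

-- the element A's loop tests at index r (false on IndexError)
def testA (lines : List String) (r : Int) : Bool :=
  match PySem.List.pyGet? lines r with
  | none => false
  | some s => PySem.Str.strip s == ""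

-- the 'last' value B computes
def lastIdx (lines : List String) : Int := (nonBlankIndices lines).getLast?.getD (-1)

theorem loopA_eq_all (lines : List String) (idxs : List Int) :
    lastLineLoopA lines idxs = idxs.all (testA lines) := by
  induction idxs with
  | nil => rfl
  | cons r rs ih =>
    simp only [lastLineLoopA, List.all_cons, testA]
    cases h : PySem.List.pyGet? lines r with
    | none => simp
    | some s =>
      by_cases hs : PySem.Str.strip s = ""
      · simp [hs, ih]
      · simp [hs]

theorem testA_eq_blankAt (lines : List String) (r : Int) (h0 : 0 ≤ r) (h1 : r < (lines.length : Int)) :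
    testA lines r = blankAt lines r := by
  unfold testA blankAt
  rw [PySem.List.pyGet?_eq_some_getElem lines h0 h1]

theorem blankAt_append_left (ls : List String) (s : String) (i : Int)
    (h0 : 0 ≤ i) (h1 : i < (ls.length : Int)) :
    blankAt (ls ++ [s]) i = blankAt ls i := by
  unfold blankAt
  rw [PySem.List.pyGet?_eq_some_getElem ls h0 h1,
      PySem.List.pyGet?_eq_some_getElem (ls ++ [s]) h0 (by simp; omega)]
  have h : (ls ++ [s])[i.toNat]'(by simp; omega) = ls[i.toNat]'(by omega) :=
    List.getElem_append_left (by omega)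
  rw [h]

theorem blankAt_append_last (ls : List String) (s : String) :
    blankAt (ls ++ [s]) (ls.length : Int) = (PySem.Str.strip s == "") := by
  unfold blankAt
  rw [PySem.List.pyGet?_eq_some_getElem (ls ++ [s]) (by positivity) (by simp)]
  simp

theorem nonBlankIndices_append (ls : List String) (s : String) :
    nonBlankIndices (ls ++ [s]) =
      nonBlankIndices ls ++ (if PySem.Str.strip s ≠ "" then [((ls.length : Int))] else []) := by
  unfold nonBlankIndices
  rw [PySem.List.enumerate_append, List.filterMap_append]
  congr 1
  rw [PySem.List.enumerate_cons, PySem.List.enumerate_nil]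
  by_cases hs : PySem.Str.strip s = "" <;> simp [hs]

-- the combined characterisation of B's 'last' value, by reverse induction on the lines
theorem lastIdx_props (lines : List String) :
    -1 ≤ lastIdx lines ∧ lastIdx lines < (lines.length : Int) ∧
    (lastIdx lines = -1 ∨ (0 ≤ lastIdx lines ∧ blankAt lines (lastIdx lines) = false)) ∧
    (∀ i : Int, lastIdx lines < i → 0 ≤ i → i < (lines.length : Int) → blankAt lines i = true) := by
  induction lines using List.reverseRecOn with
  | nil =>
    refine ⟨by simp [lastIdx, nonBlankIndices, PySem.List.enumerate_nil], by simp [lastIdx, nonBlankIndices, PySem.List.enumerate_nil], Or.inl (by simp [lastIdx, nonBlankIndices, PySem.List.enumerate_nil]), ?_⟩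
    intro i _ _ h3; simp at h3; omega
  | append_singleton ls s ih =>
    obtain ⟨ih1, ih2, ih3, ih4⟩ := ih
    have hlen : ((ls ++ [s]).length : Int) = (ls.length : Int) + 1 := by simp
    by_cases hs : PySem.Str.strip s = ""
    · -- appended line blank: lastIdx unchanged
      have heq : lastIdx (ls ++ [s]) = lastIdx ls := by
        unfold lastIdx
        rw [nonBlankIndices_append, if_neg (by simp [hs])]
        simp
      rw [heq, hlen]
      refine ⟨ih1, by omega, ?_, ?_⟩
      · rcases ih3 with h | ⟨h0, hb⟩
        · exact Or.inl h
        · exact Or.inr ⟨h0, by rw [blankAt_append_left ls s _ h0 ih2]; exact hb⟩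
      · intro i hi h0 h1
        by_cases him : i = (ls.length : Int)
        · rw [him, blankAt_append_last]; simp [hs]
        · rw [blankAt_append_left ls s i h0 (by omega)]
          exact ih4 i hi h0 (by omega)
    · -- appended line non-blank: it is the new last non-blank index
      have heq : lastIdx (ls ++ [s]) = (ls.length : Int) := by
        unfold lastIdx
        rw [nonBlankIndices_append, if_pos (by simp [hs])]
        simp
      rw [heq, hlen]
      refine ⟨by omega, by omega, ?_, ?_⟩
      · refine Or.inr ⟨by omega, ?_⟩
        rw [blankAt_append_last]; simp [hs]
      · intro i hi _ h1; omega

theorem alt_iff (lines : List String) (ln : Int) (hln : -1 ≤ ln) :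
    last_line_py_alt lines ln = true ↔
    (∀ i : Int, ln < i → 0 ≤ i → i < (lines.length : Int) → blankAt lines i = true) := by
  obtain ⟨h1, h2, h3, h4⟩ := lastIdx_props lines
  unfold last_line_py_alt
  show (decide (lastIdx lines ≤ ln) = true) ↔ _
  rw [decide_eq_true_eq]
  constructor
  · intro hle i hi h0 hn
    exact h4 i (by omega) h0 hn
  · intro hall
    by_contra hc
    rcases h3 with he | ⟨h0, hb⟩
    · omega
    · have := hall (lastIdx lines) (by omega) h0 h2
      rw [hb] at this; exact absurd this (by simp)

theorem alt_false_of_neg (lines : List String) (ln : Int) (hln : ln ≤ -2) :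
    last_line_py_alt lines ln = false := by
  obtain ⟨h1, _, _, _⟩ := lastIdx_props lines
  unfold last_line_py_alt
  show (decide (lastIdx lines ≤ ln)) = false
  simp only [decide_eq_false_iff_not, not_le]
  omega

theorem a_true_of_blank (lines : List String) (ln : Int)
    (hpre : -(lines.length : Int) ≤ ln + 1)
    (hblank : ∀ s ∈ lines, PySem.Str.strip s = "") :
    last_line_py lines ln = true := by
  unfold last_line_py
  by_cases h : ln = (lines.length : Int)
  · simp [h]
  · simp only [h, if_false]
    rw [loopA_eq_all, List.all_eq_true]
    intro r hr
    rw [PySem.List.mem_pyRange_one] at hr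
    unfold testA
    cases hg : PySem.List.pyGet? lines r with
    | none =>
      rw [PySem.List.pyGet?_eq_none_iff] at hg
      exact absurd ⟨by omega, hr.2⟩ hg
    | some s =>
      have := hblank s (PySem.List.mem_of_pyGet?_eq_some lines hg)
      simp [this]

-- ===== VERDICT (by name: the statement is the Claim_ definition above) =====
theorem last_line_py_spec : Claim_unchanged_last_line_py := by
  intro lines ln _ hpre hnd
  unfold Pre_last_line_py at hpre
  by_cases hln : -1 ≤ ln
  · -- ordinary line numbers: both sides decide 'every line after ln is blank'
    rw [Bool.eq_iff_iff, alt_iff lines ln hln]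
    unfold last_line_py
    by_cases heq : ln = (lines.length : Int)
    · rw [if_pos heq]
      simp only [true_iff]
      intro i h1 _ h3; omega
    · simp only [heq, if_false]
      rw [loopA_eq_all, List.all_eq_true]
      constructor
      · intro h i h1 h2 h3
        rw [← testA_eq_blankAt lines i h2 h3]
        exact h i (by rw [PySem.List.mem_pyRange_one]; omega)
      · intro h r hr
        rw [PySem.List.mem_pyRange_one] at hr
        rw [testA_eq_blankAt lines r (by omega) hr.2]
        exact h r (by omega) (by omega) hr.2
  · -- ln ≤ -2, not all lines blank (¬D_): A hits a non-blank wrapped index, B has last ≥ -1 > ln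
    unfold D_last_line_py at hnd
    push Not at hnd
    have hnn : (0 : Int) ≤ (lines.length : Int) := by positivity
    have hpre' : -(lines.length : Int) ≤ ln + 1 := by omega
    obtain ⟨s, hs, hsn⟩ := hnd (by omega) (by omega)
    obtain ⟨j, hj, hje⟩ := List.mem_iff_getElem.mp hs
    rw [alt_false_of_neg lines ln (by omega)]
    unfold last_line_py
    rw [if_neg (by omega)]
    rw [loopA_eq_all]
    apply List.all_eq_false.mpr
    refine ⟨(j : Int), by rw [PySem.List.mem_pyRange_one]; omega, ?_⟩
    rw [testA_eq_blankAt lines (j : Int) (by positivity) (by omega)]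
    unfold blankAt
    rw [PySem.List.pyGet?_eq_some_getElem lines (by positivity) (by omega)]
    simpa [hje] using hsn

theorem last_line_py_changed : Claim_changed_last_line_py := by
  unfold Claim_changed_last_line_py; decide

theorem last_line_py_tight : Claim_exact_last_line_py := by
  intro lines ln _ hpre hd
  obtain ⟨h1, h2, h3⟩ := hd
  rw [a_true_of_blank lines ln (by omega) h3, alt_false_of_neg lines ln h1]
  simp
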